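-- pv_equiv track=rewrite | github.com/eluvishis/SSMIF_Coding_Assignment | question3.py | sum_ssmif
-- ===== SOURCE A (Python) =====
-- def get_sum(l ,start, end, multiplier):
--     """Returns sum of each inner-list depending on multiplier"""
--
--     #one instance is already accounted for in totSum
--     multBy = multiplier - 1
--     totSum = sum(l)
--
--     #creates a new list in start and end are in the original list
--     if start in l:
--         startIndex = l.index(start)
--         remainingList = l[startIndex:]
--
--         if end in remainingList:
--             endIndex = remainingList.index(end)
--
--             #includes the end value
--             totSum += sum(remainingList[:endIndex + 1 ]) * multBy
--
--     return totSum
--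
-- def sum_ssmif(l):
--     """Returns the ssmif_sum of a nested list"""
--
--     #new list to append values to
--     myList = []
--
--     for i in range(len(l)):
--         #even indices
--         if i % 2 == 0:
--             evenResult = get_sum(l[i], 9, 6, 2)
--             myList.append(evenResult)
--
--         #odd indices
--         else:
--             oddResult = get_sum(l[i], 7, 4, 3)
--             myList.append(oddResult)
--
--     #final list checks for 4 and 5
--     finList = get_sum(myList, 4, 5, 0)
--
--     return finList
-- ===== SOURCE B (Python) =====
-- def get_sum(l, start, end, multiplier):
--     """Single forward pass: running total plus a tentative buffer that starts
--     at the first `start`, commits (as bonus) when `end` is seen, else is discarded."""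
--     total = 0
--     collecting = False
--     done = False
--     buf = 0
--     bonus = 0
--     for x in l:
--         total += x
--         if done:
--             continue
--         if collecting:
--             buf += x
--             if x == end:
--                 bonus = buf
--                 done = True
--         elif x == start:
--             if x == end:
--                 bonus = x
--                 done = True
--             else:
--                 collecting = True
--                 buf = x
--     return total + bonus * (multiplier - 1)
--
-- def sum_ssmif(l):
--     myList = [get_sum(x, 9, 6, 2) if i % 2 == 0 else get_sum(x, 7, 4, 3)
--               for i, x in enumerate(l)]
--     return get_sum(myList, 4, 5, 0)
-- ===== Notes on version B (the rewrite author's own statement) =====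
-- stated objective: alternative
-- what changed: get_sum is rewritten as a single forward pass keeping a running total plus a tentative buffer committed at the first end after the first start, replacing the membership tests, .index calls, slices and sums (several scans per list); the outer index loop becomes an enumerate comprehension.
import Mathlib
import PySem

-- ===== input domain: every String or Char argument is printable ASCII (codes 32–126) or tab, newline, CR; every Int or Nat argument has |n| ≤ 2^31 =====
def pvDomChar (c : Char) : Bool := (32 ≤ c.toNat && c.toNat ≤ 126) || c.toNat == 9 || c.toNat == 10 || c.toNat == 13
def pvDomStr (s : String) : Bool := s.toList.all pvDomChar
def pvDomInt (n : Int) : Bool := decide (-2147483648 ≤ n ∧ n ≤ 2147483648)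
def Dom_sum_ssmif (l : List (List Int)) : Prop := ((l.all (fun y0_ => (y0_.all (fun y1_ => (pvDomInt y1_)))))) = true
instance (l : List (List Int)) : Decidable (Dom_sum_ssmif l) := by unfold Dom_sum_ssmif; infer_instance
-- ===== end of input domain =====

-- B changes get_sum into a single forward pass (running total + tentative buffer committed at the
-- first `end` after the first `start`) instead of membership tests, .index and slices; return value only.

-- ===== PORT A =====
-- literal transliteration of A's get_sum
def getSumA (l : List Int) (start end_ multiplier : Int) : Int :=
  let multBy := multiplier - 1
  let totSum := l.sum
  if start ∈ l then
    match PySem.List.index? l start with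
    | some startIndex =>
      let remainingList := PySem.List.slice l (some (startIndex : Int)) none
      if end_ ∈ remainingList then
        match PySem.List.index? remainingList end_ with
        | some endIndex =>
            totSum + (PySem.List.slice remainingList none (some ((endIndex : Int) + 1))).sum * multBy
        | none => totSum   -- unreachable: guarded by the membership test
      else totSum
    | none => totSum       -- unreachable: guarded by the membership test
  else totSum

def sum_ssmif (l : List (List Int)) : Int :=
  let myList := (PySem.List.pyRange 0 (l.length : Int) 1).foldl
    (fun acc i =>
      if PySem.Int.mod i 2 = 0 then acc ++ [getSumA (PySem.List.pyGetD l i []) 9 6 2]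
      else acc ++ [getSumA (PySem.List.pyGetD l i []) 7 4 3]) []
  getSumA myList 4 5 0

-- ===== PORT B =====
structure GState where
  total : Int
  coll : Bool
  done : Bool
  buf : Int
  bonus : Int
deriving Repr, DecidableEq

def gstep (start end_ : Int) (st : GState) (x : Int) : GState :=
  let total := st.total + x
  if st.done then { st with total := total }
  else if st.coll then
    let buf := st.buf + x
    if x = end_ then { total := total, coll := st.coll, done := true, buf := buf, bonus := buf }
    else { total := total, coll := st.coll, done := st.done, buf := buf, bonus := st.bonus }
  else if x = start then
    if x = end_ then { total := total, coll := st.coll, done := true, buf := st.buf, bonus := x }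
    else { total := total, coll := true, done := st.done, buf := x, bonus := st.bonus }
  else { st with total := total }

def getSumB (l : List Int) (start end_ multiplier : Int) : Int :=
  let fin := l.foldl (gstep start end_) ⟨0, false, false, 0, 0⟩
  fin.total + fin.bonus * (multiplier - 1)

def sum_ssmif_alt (l : List (List Int)) : Int :=
  let myList := (PySem.List.enumerate l 0).map
    (fun p => if PySem.Int.mod p.1 2 = 0 then getSumB p.2 9 6 2 else getSumB p.2 7 4 3)
  getSumB myList 4 5 0

-- ===== PRECONDITION & SPEC =====
def Spec_sum_ssmif (l : List (List Int)) (out : Int) : Prop := out = sum_ssmif_alt l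
instance (l : List (List Int)) (out : Int) : Decidable (Spec_sum_ssmif l out) := by unfold Spec_sum_ssmif; infer_instance

-- ===== CLAIM (what is proved, stated in full; the proofs are below) =====
def Claim_equal_sum_ssmif : Prop := ∀ (l : List (List Int)), Dom_sum_ssmif l → Spec_sum_ssmif l (sum_ssmif l)

-- ===== LEMMAS AND PROOFS =====

theorem gstep_done (s e x t b bn : Int) (c : Bool) :
    gstep s e ⟨t, c, true, b, bn⟩ x = ⟨t + x, c, true, b, bn⟩ := by
  simp [gstep]

theorem gstep_coll_hit (s e t b bn : Int) :
    gstep s e ⟨t, true, false, b, bn⟩ e = ⟨t + e, true, true, b + e, b + e⟩ := by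
  simp [gstep]

theorem gstep_coll_miss (s e x t b bn : Int) (hx : x ≠ e) :
    gstep s e ⟨t, true, false, b, bn⟩ x = ⟨t + x, true, false, b + x, bn⟩ := by
  simp [gstep, hx]

theorem gstep_fresh_other (s e x t b bn : Int) (hx : x ≠ s) :
    gstep s e ⟨t, false, false, b, bn⟩ x = ⟨t + x, false, false, b, bn⟩ := by
  simp [gstep, hx]

theorem gstep_fresh_start_hit (s t b bn : Int) :
    gstep s s ⟨t, false, false, b, bn⟩ s = ⟨t + s, false, true, b, s⟩ := by
  simp [gstep]

theorem gstep_fresh_start_miss (s e t b bn : Int) (he : s ≠ e) :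
    gstep s e ⟨t, false, false, b, bn⟩ s = ⟨t + s, true, false, s, bn⟩ := by
  simp [gstep, he]

-- once done, the fold only accumulates the total
theorem fold_done (s e : Int) (l : List Int) (t b bn : Int) (c : Bool) :
    l.foldl (gstep s e) ⟨t, c, true, b, bn⟩ = ⟨t + l.sum, c, true, b, bn⟩ := by
  induction l generalizing t with
  | nil => simp
  | cons x xs ih => rw [List.foldl_cons, gstep_done, ih]; simp [add_assoc]

-- in the collecting state the fold commits at the first `end_`
theorem fold_coll (s e : Int) (l : List Int) (t b : Int) :
    l.foldl (gstep s e) ⟨t, true, false, b, 0⟩ =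
      match PySem.List.index? l e with
      | some ei => ⟨t + l.sum, true, true, b + (l.take (ei + 1)).sum, b + (l.take (ei + 1)).sum⟩
      | none => ⟨t + l.sum, true, false, b + l.sum, 0⟩ := by
  induction l generalizing t b with
  | nil => simp
  | cons x xs ih =>
    by_cases hx : x = e
    · subst hx
      rw [PySem.List.index?_cons_self, List.foldl_cons, gstep_coll_hit, fold_done]
      simp [GState.mk.injEq]
      omega
    · rw [PySem.List.index?_cons_of_ne _ hx, List.foldl_cons,
        gstep_coll_miss s e x t b 0 hx, ih]
      cases h : PySem.List.index? xs e with
      | none => simp [GState.mk.injEq]; omega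
      | some ei => simp [GState.mk.injEq]; omega

-- A's bonus term, as the fold from the fresh state computes it
def aBonus (l : List Int) (s e : Int) : Int :=
  ((PySem.List.index? l s).bind (fun si =>
    (PySem.List.index? (l.drop si) e).map (fun ei => ((l.drop si).take (ei + 1)).sum))).getD 0

theorem aBonus_none (l : List Int) (s e : Int) (h : PySem.List.index? l s = none) :
    aBonus l s e = 0 := by
  unfold aBonus; rw [h]; rfl

theorem aBonus_some_none (l : List Int) (s e : Int) (si : Nat)
    (h : PySem.List.index? l s = some si) (h2 : PySem.List.index? (l.drop si) e = none) :
    aBonus l s e = 0 := by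
  unfold aBonus; rw [h]
  show ((PySem.List.index? (l.drop si) e).map
    (fun ei => ((l.drop si).take (ei + 1)).sum)).getD 0 = 0
  rw [h2]; rfl

theorem aBonus_some_some (l : List Int) (s e : Int) (si ei : Nat)
    (h : PySem.List.index? l s = some si) (h2 : PySem.List.index? (l.drop si) e = some ei) :
    aBonus l s e = ((l.drop si).take (ei + 1)).sum := by
  unfold aBonus; rw [h]
  show ((PySem.List.index? (l.drop si) e).map
    (fun ei => ((l.drop si).take (ei + 1)).sum)).getD 0 = _
  rw [h2]; rfl

theorem aBonus_cons_other (x : Int) (xs : List Int) (s e : Int) (hx : x ≠ s) :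
    aBonus (x :: xs) s e = aBonus xs s e := by
  unfold aBonus
  rw [PySem.List.index?_cons_of_ne _ hx]
  cases h : PySem.List.index? xs s with
  | none => rfl
  | some si =>
    show ((PySem.List.index? ((x :: xs).drop (si + 1)) e).map
      (fun ei => (((x :: xs).drop (si + 1)).take (ei + 1)).sum)).getD 0 = _
    rw [List.drop_succ_cons]
    rfl

theorem aBonus_start_hit (s : Int) (xs : List Int) :
    aBonus (s :: xs) s s = s := by
  unfold aBonus
  rw [PySem.List.index?_cons_self]
  show ((PySem.List.index? ((s :: xs).drop 0) s).map
    (fun ei => (((s :: xs).drop 0).take (ei + 1)).sum)).getD 0 = s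
  rw [List.drop_zero, PySem.List.index?_cons_self]
  simp

theorem aBonus_start_some (s e : Int) (xs : List Int) (ei : Nat) (he : s ≠ e)
    (h : PySem.List.index? xs e = some ei) :
    aBonus (s :: xs) s e = s + (xs.take (ei + 1)).sum := by
  unfold aBonus
  rw [PySem.List.index?_cons_self]
  show ((PySem.List.index? ((s :: xs).drop 0) e).map
    (fun ei => (((s :: xs).drop 0).take (ei + 1)).sum)).getD 0 = _
  rw [List.drop_zero, PySem.List.index?_cons_of_ne _ he, h]
  simp

theorem aBonus_start_none (s e : Int) (xs : List Int) (he : s ≠ e)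
    (h : PySem.List.index? xs e = none) :
    aBonus (s :: xs) s e = 0 := by
  unfold aBonus
  rw [PySem.List.index?_cons_self]
  show ((PySem.List.index? ((s :: xs).drop 0) e).map
    (fun ei => (((s :: xs).drop 0).take (ei + 1)).sum)).getD 0 = _
  rw [List.drop_zero, PySem.List.index?_cons_of_ne _ he, h]; rfl

theorem fold_fresh (s e : Int) (l : List Int) (t b : Int) :
    ((l.foldl (gstep s e) ⟨t, false, false, b, 0⟩).total = t + l.sum) ∧
    ((l.foldl (gstep s e) ⟨t, false, false, b, 0⟩).bonus = aBonus l s e) := by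
  induction l generalizing t b with
  | nil => simp [aBonus]
  | cons x xs ih =>
    by_cases hx : x = s
    · subst hx
      by_cases he : x = e
      · subst he
        rw [List.foldl_cons, gstep_fresh_start_hit, fold_done, aBonus_start_hit]
        simp
        omega
      · rw [List.foldl_cons, gstep_fresh_start_miss x e t b 0 he, fold_coll]
        cases h : PySem.List.index? xs e with
        | none =>
          rw [aBonus_start_none x e xs he h]
          simp
          omega
        | some ei =>
          rw [aBonus_start_some x e xs ei he h]
          simp
          omega
    · rw [List.foldl_cons, gstep_fresh_other s e x t b 0 hx, aBonus_cons_other x xs s e hx]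
      refine ⟨?_, (ih (t + x) b).2⟩
      rw [(ih (t + x) b).1]
      simp
      omega

theorem getSum_eq (l : List Int) (s e m : Int) : getSumA l s e m = getSumB l s e m := by
  have hf := fold_fresh s e l 0 0
  simp only [getSumA, getSumB]
  rw [hf.1, hf.2]
  by_cases hs : s ∈ l
  · rw [if_pos hs]
    cases h : PySem.List.index? l s with
    | none => exact absurd ((PySem.List.index?_eq_none_iff _ _).mp h) (not_not.mpr hs)
    | some si =>
      dsimp only
      rw [PySem.List.slice_from_natCast]
      by_cases he : e ∈ l.drop si
      · rw [if_pos he]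
        cases h2 : PySem.List.index? (l.drop si) e with
        | none => exact absurd ((PySem.List.index?_eq_none_iff _ _).mp h2) (not_not.mpr he)
        | some ei =>
          dsimp only
          have hcast : ((ei : Int) + 1) = ((ei + 1 : Nat) : Int) := by push_cast; ring
          rw [hcast, PySem.List.slice_to_natCast, aBonus_some_some l s e si ei h h2]
          ring
      · rw [if_neg he]
        rw [aBonus_some_none l s e si h ((PySem.List.index?_eq_none_iff _ _).mpr he)]
        ring
  · rw [if_neg hs]
    rw [aBonus_none l s e ((PySem.List.index?_eq_none_iff _ _).mpr hs)]
    ring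

theorem myList_eq (l : List (List Int)) :
    (PySem.List.pyRange 0 (l.length : Int) 1).foldl
      (fun acc i =>
        if PySem.Int.mod i 2 = 0 then acc ++ [getSumA (PySem.List.pyGetD l i []) 9 6 2]
        else acc ++ [getSumA (PySem.List.pyGetD l i []) 7 4 3]) [] =
    (PySem.List.enumerate l 0).map
      (fun p => if PySem.Int.mod p.1 2 = 0 then getSumB p.2 9 6 2 else getSumB p.2 7 4 3) := by
  rw [PySem.List.enumerate_eq_map_pyRange (d := ([] : List Int)), List.map_map]
  have key : ∀ (r : List Int) (acc : List Int),
      r.foldl (fun acc i =>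
        if PySem.Int.mod i 2 = 0 then acc ++ [getSumA (PySem.List.pyGetD l i []) 9 6 2]
        else acc ++ [getSumA (PySem.List.pyGetD l i []) 7 4 3]) acc =
      acc ++ r.map (fun i =>
        if PySem.Int.mod i 2 = 0 then getSumB (PySem.List.pyGetD l i []) 9 6 2
        else getSumB (PySem.List.pyGetD l i []) 7 4 3) := by
    intro r
    induction r with
    | nil => simp
    | cons y ys ih =>
      intro acc
      simp only [List.foldl_cons, List.map_cons]
      by_cases hy : PySem.Int.mod y 2 = 0
      · rw [if_pos hy, if_pos hy, ih, getSum_eq]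
        simp
      · rw [if_neg hy, if_neg hy, ih, getSum_eq]
        simp
  rw [key]
  simp [Function.comp]

-- ===== VERDICT (by name: the statement is the Claim_ definition above) =====
theorem sum_ssmif_spec : Claim_equal_sum_ssmif := by
  intro l _
  show sum_ssmif l = sum_ssmif_alt l
  simp only [sum_ssmif, sum_ssmif_alt]
  rw [myList_eq, getSum_eq]
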